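-- pv_equiv track=rewrite | github.com/akrudal/algorithm | 프로그래머스/2/172927. 광물 캐기/광물 캐기.py | countTired
-- ===== SOURCE A (Python) =====
-- def countTired(minerals, i, pick):
--     answer = 0
--     for j in range(5):
--         if i*5+j >= len(minerals):
--             return answer
--         if pick == 'diamond':
--             answer += 1
--         elif pick == 'iron':
--             if minerals[i*5+j] == 'diamond':
--                 answer += 5
--             else:
--                 answer += 1
--         else:
--             if minerals[i*5+j] == 'diamond':
--                 answer += 25
--             elif minerals[i*5+j] == 'iron':
--                 answer += 5
--             else:
--                 answer += 1
--     return answer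
-- ===== SOURCE B (Python) =====
-- def countTired(minerals, i, pick):
--     group = minerals[i*5:i*5+5]
--     n = len(group)
--     if pick == 'diamond':
--         return n
--     d = group.count('diamond')
--     if pick == 'iron':
--         return n + 4*d
--     return n + 24*d + 4*group.count('iron')
-- ===== Notes on version B (the rewrite author's own statement) =====
-- stated objective: alternative
-- what changed: A sums a per-mineral fatigue inside an early-return index loop; B never accumulates per element: it counts the diamonds and irons in the slice minerals[i*5:i*5+5] and computes the fatigue by the closed formula n + 24*d + 4*r (adjusted per pick), where n is the group size.
-- intended difference: On negative group indices where A still returns (i = -1 with any pick, and the diamond pick whenever i*5 runs off the front of the list) A ignores the wrap — for i = -1 it returns the fatigue of the last five minerals, and with the diamond pick it always returns 5 — while B's front-counted slice is empty or clipped there, and since i is a group index counted from the front B's value is the intended one. — e.g. on countTired(["stone", "stone", "stone", "stone", "stone"], -1, "stone"): A returns 5, B returns 0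
import Mathlib
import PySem

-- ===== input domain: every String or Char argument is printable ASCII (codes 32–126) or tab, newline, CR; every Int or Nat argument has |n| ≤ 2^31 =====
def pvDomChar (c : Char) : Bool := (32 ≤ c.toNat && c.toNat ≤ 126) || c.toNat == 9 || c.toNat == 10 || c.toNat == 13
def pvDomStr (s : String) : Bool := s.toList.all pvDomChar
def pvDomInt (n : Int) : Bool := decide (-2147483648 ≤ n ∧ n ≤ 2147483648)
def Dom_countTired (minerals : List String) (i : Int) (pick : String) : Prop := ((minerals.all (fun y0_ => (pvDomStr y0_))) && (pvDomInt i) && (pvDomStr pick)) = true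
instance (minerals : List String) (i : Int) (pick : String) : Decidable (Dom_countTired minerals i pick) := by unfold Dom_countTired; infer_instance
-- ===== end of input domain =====

-- B replaces A's per-mineral accumulation loop by counting: it counts the diamonds and
-- irons in the slice minerals[i*5:i*5+5] and returns the closed formula n + 24*d + 4*r
-- adjusted per pick (objective: alternative).

-- ===== PORT A =====
def countTiredLoop (minerals : List String) (i : Int) (pick : String) : List Int → Int → Int
  | [], answer => answer
  | j :: js, answer =>
    if i * 5 + j ≥ PySem.List.len minerals then answer
    else if pick = "diamond" then countTiredLoop minerals i pick js (answer + 1)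
    else if pick = "iron" then
      if PySem.List.pyGetD minerals (i * 5 + j) "" = "diamond" then
        countTiredLoop minerals i pick js (answer + 5)
      else countTiredLoop minerals i pick js (answer + 1)
    else
      if PySem.List.pyGetD minerals (i * 5 + j) "" = "diamond" then
        countTiredLoop minerals i pick js (answer + 25)
      else if PySem.List.pyGetD minerals (i * 5 + j) "" = "iron" then
        countTiredLoop minerals i pick js (answer + 5)
      else countTiredLoop minerals i pick js (answer + 1)

def countTired (minerals : List String) (i : Int) (pick : String) : Int :=
  countTiredLoop minerals i pick (PySem.List.pyRange 0 5 1) 0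

-- ===== PORT B =====
def countTired_alt (minerals : List String) (i : Int) (pick : String) : Int :=
  let group := PySem.List.slice minerals (some (i * 5)) (some (i * 5 + 5))
  let n : Int := PySem.List.len group
  if pick = "diamond" then n
  else
    let d : Int := PySem.List.count group "diamond"
    if pick = "iron" then n + 4 * d
    else n + 24 * d + 4 * PySem.List.count group "iron"

-- ===== PRECONDITION & SPEC =====
-- Pre_ excludes exactly the inputs on which A raises IndexError: a negative i whose
-- wrapped window start i*5 runs off the front of the list, with any pick other than
-- 'diamond' (the diamond branch never indexes, so A always returns there).
def Pre_countTired (minerals : List String) (i : Int) (pick : String) : Prop :=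
  0 ≤ i ∨ pick = "diamond" ∨ 5 * (-i) ≤ (minerals.length : Int)
instance (minerals : List String) (i : Int) (pick : String) : Decidable (Pre_countTired minerals i pick) := by unfold Pre_countTired; infer_instance
def pvWitness_countTired : List String × Int × String := (["stone"], 0, "iron")

-- On negative group indices where A still returns — i = -1 (any pick), and the diamond
-- pick whenever i*5 runs off the front — A ignores the wrap (for i = -1 it returns the
-- fatigue of the LAST five minerals; with the diamond pick it always returns 5), while
-- B's front-counted slice is empty or clipped there and B returns the fatigue of the
-- minerals actually in group i; since i is a group index counted from the front, B's
-- value is the intended one.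
def D_countTired (minerals : List String) (i : Int) (pick : String) : Prop :=
  i = -1 ∨ (pick = "diamond" ∧ i * 5 + (minerals.length : Int) < 0)
instance (minerals : List String) (i : Int) (pick : String) : Decidable (D_countTired minerals i pick) := by unfold D_countTired; infer_instance

def Spec_countTired (minerals : List String) (i : Int) (pick : String) (out : Int) : Prop :=
  ¬ D_countTired minerals i pick → out = countTired_alt minerals i pick
instance (minerals : List String) (i : Int) (pick : String) (out : Int) : Decidable (Spec_countTired minerals i pick out) := by unfold Spec_countTired; infer_instance

def pvDiffWitness_countTired : List String × Int × String := (["stone", "stone", "stone", "stone", "stone"], -1, "stone")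
def pvDiffWitnessOut_countTired : Int × Int := (5, 0)

-- ===== CLAIM (what is proved, stated in full; the proofs are below) =====
def Claim_unchanged_countTired : Prop := ∀ (minerals : List String) (i : Int) (pick : String), Dom_countTired minerals i pick → Pre_countTired minerals i pick → Spec_countTired minerals i pick (countTired minerals i pick)
def Claim_changed_countTired : Prop := Dom_countTired (pvDiffWitness_countTired.1) (pvDiffWitness_countTired.2.1) (pvDiffWitness_countTired.2.2) ∧ Pre_countTired (pvDiffWitness_countTired.1) (pvDiffWitness_countTired.2.1) (pvDiffWitness_countTired.2.2) ∧ D_countTired (pvDiffWitness_countTired.1) (pvDiffWitness_countTired.2.1) (pvDiffWitness_countTired.2.2) ∧ countTired (pvDiffWitness_countTired.1) (pvDiffWitness_countTired.2.1) (pvDiffWitness_countTired.2.2) = pvDiffWitnessOut_countTired.1 ∧ countTired_alt (pvDiffWitness_countTired.1) (pvDiffWitness_countTired.2.1) (pvDiffWitness_countTired.2.2) = pvDiffWitnessOut_countTired.2 ∧ pvDiffWitnessOut_countTired.1 ≠ pvDiffWitnessOut_countTired.2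
def Claim_exact_countTired : Prop := ∀ (minerals : List String) (i : Int) (pick : String), Dom_countTired minerals i pick → Pre_countTired minerals i pick → D_countTired minerals i pick → countTired minerals i pick ≠ countTired_alt minerals i pick

-- ===== LEMMAS AND PROOFS =====

-- A's per-mineral fatigue as one function (proof-side characterisation of A's branch cascade).
def aCost (pick m : String) : Int :=
  if pick = "diamond" then 1
  else if pick = "iron" then (if m = "diamond" then 5 else 1)
  else (if m = "diamond" then 25 else if m = "iron" then 5 else 1)

lemma aCost_pos (p m : String) : 1 ≤ aCost p m := by
  unfold aCost; split_ifs <;> norm_num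

-- summing A's per-mineral fatigue over a list is B's counting formula
lemma sum_aCost (p : String) (l : List String) :
    (l.map (aCost p)).sum =
      if p = "diamond" then (l.length : Int)
      else if p = "iron" then (l.length : Int) + 4 * (l.count "diamond" : Int)
      else (l.length : Int) + 24 * (l.count "diamond" : Int) + 4 * (l.count "iron" : Int) := by
  induction l with
  | nil => simp
  | cons x xs ih =>
    simp only [List.map_cons, List.sum_cons, ih, aCost, List.count_cons, List.length_cons]
    by_cases hp1 : p = "diamond"
    · simp [hp1]; ring
    · by_cases hp2 : p = "iron"
      · simp only [hp2, if_true]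
        by_cases hx : x = "diamond" <;> simp [hx] <;> ring
      · simp only [hp1, hp2, if_false]
        by_cases hx1 : x = "diamond"
        · simp [hx1]; ring
        · by_cases hx2 : x = "iron" <;> simp [hx1, hx2] <;> ring

lemma alt_eq_sum (ms : List String) (i : Int) (p : String) :
    countTired_alt ms i p
      = ((PySem.List.slice ms (some (i * 5)) (some (i * 5 + 5))).map (fun x => aCost p x)).sum := by
  unfold countTired_alt
  rw [sum_aCost]
  simp only [PySem.List.len_eq, PySem.List.count_eq]

lemma loop_cons_ge (ms : List String) (i : Int) (p : String) (j : Int) (js : List Int) (ans : Int)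
    (h : i * 5 + j ≥ PySem.List.len ms) :
    countTiredLoop ms i p (j :: js) ans = ans := by
  unfold countTiredLoop; rw [if_pos h]

lemma loop_cons_lt (ms : List String) (i : Int) (p : String) (j : Int) (js : List Int) (ans : Int)
    (h : ¬ i * 5 + j ≥ PySem.List.len ms) :
    countTiredLoop ms i p (j :: js) ans
      = countTiredLoop ms i p js (ans + aCost p (PySem.List.pyGetD ms (i * 5 + j) "")) := by
  simp only [countTiredLoop]
  rw [if_neg h]
  unfold aCost
  split_ifs <;> rfl

lemma loop_inv (ms : List String) (i : Int) (p : String) (a : Nat)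
    (hidx : ∀ j : Nat, j < 5 → a + j < ms.length →
      PySem.List.pyGetD ms (i * 5 + (j : Int)) "" = ms.getD (a + j) "")
    (hcond : ∀ j : Nat, j < 5 → ((ms.length : Int) ≤ i * 5 + (j : Int) ↔ ms.length ≤ a + j)) :
    ∀ n : Nat, n ≤ 5 → ∀ ans : Int,
      countTiredLoop ms i p (PySem.List.pyRange ((5 : Int) - (n : Int)) 5 1) ans
        = ans + (((ms.drop (a + (5 - n))).take n).map (fun x => aCost p x)).sum := by
  intro n
  induction n with
  | zero =>
    intro _ ans
    rw [show ((5:Int) - ((0:Nat):Int)) = 5 by norm_num, PySem.List.pyRange_one_eq_nil (by omega)]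
    simp [countTiredLoop]
  | succ k ih =>
    intro hk ans
    have hjn : ((5 : Int) - ((k+1 : Nat) : Int)) = (((4 - k : Nat)) : Int) := by omega
    have hj4 : (4 - k) < 5 := by omega
    rw [PySem.List.pyRange_one_cons (by omega)]
    by_cases hc : ms.length ≤ a + (4 - k)
    · rw [loop_cons_ge _ _ _ _ _ _ (by rw [PySem.List.len_eq, hjn]; exact le_of_eq_of_le rfl ((hcond (4-k) hj4).mpr hc))]
      have : a + (5 - (k+1)) = a + (4 - k) := by omega
      rw [this, List.drop_eq_nil_of_le hc]
      simp
    · have hlt : a + (4 - k) < ms.length := by omega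
      rw [loop_cons_lt _ _ _ _ _ _ (by rw [PySem.List.len_eq, hjn]; exact fun hge => hc ((hcond (4-k) hj4).mp hge))]
      rw [hjn, hidx (4-k) hj4 hlt]
      rw [show ((((4 - k : Nat)) : Int) + 1) = ((5:Int) - ((k:Nat):Int)) by omega]
      rw [ih (by omega)]
      have h1 : a + (5 - (k+1)) = a + (4 - k) := by omega
      have h2 : a + (5 - k) = (a + (4 - k)) + 1 := by omega
      rw [h1, h2, List.drop_eq_getElem_cons hlt, List.take_succ_cons, List.map_cons, List.sum_cons,
        List.getD_eq_getElem ms "" hlt]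
      ring

lemma countTired_eq_sum (ms : List String) (i : Int) (p : String) (a : Nat)
    (hidx : ∀ j : Nat, j < 5 → a + j < ms.length →
      PySem.List.pyGetD ms (i * 5 + (j : Int)) "" = ms.getD (a + j) "")
    (hcond : ∀ j : Nat, j < 5 → ((ms.length : Int) ≤ i * 5 + (j : Int) ↔ ms.length ≤ a + j)) :
    countTired ms i p = (((ms.drop a).take 5).map (fun x => aCost p x)).sum := by
  have h := loop_inv ms i p a hidx hcond 5 (by omega) 0
  rw [show ((5:Int) - ((5:Nat):Int)) = 0 by norm_num] at h
  unfold countTired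
  rw [h]
  simp

lemma slice_eq_nonneg (ms : List String) (i : Int) (h : 0 ≤ i) :
    PySem.List.slice ms (some (i * 5)) (some (i * 5 + 5)) = (ms.drop (i * 5).toNat).take 5 := by
  simp only [PySem.List.slice, PySem.List.clampIdx]
  rw [if_neg (show ¬ i * 5 < 0 by omega), if_neg (show ¬ i * 5 + 5 < 0 by omega)]
  by_cases hL : ms.length ≤ (i * 5).toNat
  · rw [List.drop_eq_nil_of_le (show ms.length ≤ min (i * 5).toNat ms.length by omega),
      List.drop_eq_nil_of_le hL]
    simp
  · by_cases hR : (i * 5 + 5).toNat ≤ ms.length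
    · rw [show min (i * 5 + 5).toNat ms.length - min (i * 5).toNat ms.length = 5 by omega,
        show min (i * 5).toNat ms.length = (i * 5).toNat by omega]
    · rw [show min (i * 5).toNat ms.length = (i * 5).toNat by omega,
        show min (i * 5 + 5).toNat ms.length = ms.length by omega]
      rw [List.take_of_length_le (by simp), List.take_of_length_le (by simp; omega)]

lemma slice_eq_neg (ms : List String) (i : Int) (h2 : i ≤ -2) (hpre : 5 * (-i) ≤ (ms.length : Int)) :
    PySem.List.slice ms (some (i * 5)) (some (i * 5 + 5))
      = (ms.drop ((ms.length : Int) + i * 5).toNat).take 5 := by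
  simp only [PySem.List.slice, PySem.List.clampIdx]
  rw [if_pos (show i * 5 < 0 by omega), if_neg (show ¬ (ms.length : Int) + i * 5 < 0 by omega),
    if_pos (show i * 5 + 5 < 0 by omega),
    if_neg (show ¬ (ms.length : Int) + (i * 5 + 5) < 0 by omega)]
  rw [show ((ms.length : Int) + (i * 5 + 5)).toNat - ((ms.length : Int) + i * 5).toNat = 5 by omega]

-- A's loop with the diamond pick and a negative group index never early-returns and never
-- indexes: it returns ans + 5.
lemma loop_diamond (ms : List String) (i : Int) :
    ∀ (js : List Int) (ans : Int), (∀ j ∈ js, ¬ i * 5 + j ≥ PySem.List.len ms) →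
      countTiredLoop ms i "diamond" js ans = ans + js.length := by
  intro js
  induction js with
  | nil => intro ans _; simp [countTiredLoop]
  | cons j js ih =>
    intro ans hall
    rw [loop_cons_lt _ _ _ _ _ _ (hall j (by simp))]
    rw [ih _ (fun j hj => hall j (by simp [hj]))]
    simp only [aCost, List.length_cons]
    push_cast
    ring

lemma loop_ge (ms : List String) (i : Int) (p : String) :
    ∀ (js : List Int) (ans : Int), (∀ j ∈ js, ¬ i * 5 + j ≥ PySem.List.len ms) →
      ans + js.length ≤ countTiredLoop ms i p js ans := by
  intro js
  induction js with
  | nil => intro ans _; simp [countTiredLoop]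
  | cons j js ih =>
    intro ans hall
    rw [loop_cons_lt _ _ _ _ _ _ (hall j (by simp))]
    have h1 := ih (ans + aCost p (PySem.List.pyGetD ms (i * 5 + j) "")) (fun j hj => hall j (by simp [hj]))
    have h2 := aCost_pos p (PySem.List.pyGetD ms (i * 5 + j) "")
    simp only [List.length_cons]
    omega

lemma countTired_diamond_neg (ms : List String) (i : Int) (h : i < 0) :
    countTired ms i "diamond" = 5 := by
  unfold countTired
  rw [loop_diamond ms i _ 0
    (by
      intro j hj
      rw [PySem.List.mem_pyRange_one] at hj
      rw [PySem.List.len_eq]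
      omega)]
  simp [PySem.List.length_pyRange_one]

-- the i = -1 slice minerals[-5:0] is always empty
lemma slice_neg_one (ms : List String) :
    PySem.List.slice ms (some ((-1) * 5)) (some ((-1) * 5 + 5)) = [] := by
  simp only [PySem.List.slice, PySem.List.clampIdx]
  rw [if_pos (show (-1 : Int) * 5 < 0 by norm_num),
    if_neg (show ¬ (-1 : Int) * 5 + 5 < 0 by norm_num),
    show ((-1 : Int) * 5 + 5).toNat = 0 by norm_num]
  by_cases hL : (ms.length : Int) + (-1) * 5 < 0 <;> simp

-- the slice is shorter than 5 when the window runs off the front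
lemma slice_short (ms : List String) (i : Int) (h : i * 5 + (ms.length : Int) < 0) :
    (PySem.List.slice ms (some (i * 5)) (some (i * 5 + 5))).length < 5 := by
  have hi : i * 5 < 0 := by omega
  simp only [PySem.List.slice, PySem.List.clampIdx]
  rw [if_pos hi, if_pos (show (ms.length : Int) + i * 5 < 0 by omega)]
  by_cases hR : i * 5 + 5 < 0
  · rw [if_pos hR]
    by_cases hR2 : (ms.length : Int) + (i * 5 + 5) < 0
    · simp [hR2]
    · rw [if_neg hR2]
      simp only [List.length_take, List.length_drop]
      omega
  · rw [if_neg hR]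
    simp only [List.length_take, List.length_drop]
    omega

-- ===== VERDICT (by name: the statement is the Claim_ definition above) =====
theorem countTired_spec : Claim_unchanged_countTired := by
  intro ms i p _ hpre
  unfold Spec_countTired D_countTired
  intro hD
  have hD1 : i ≠ -1 := fun h => hD (Or.inl h)
  have hD2 : p = "diamond" → ¬ i * 5 + (ms.length : Int) < 0 :=
    fun hp hlt => hD (Or.inr ⟨hp, hlt⟩)
  rw [alt_eq_sum]
  by_cases hi : 0 ≤ i
  · rw [slice_eq_nonneg ms i hi]
    exact countTired_eq_sum ms i p (i * 5).toNat
      (fun j hj hlt => by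
        rw [PySem.List.pyGetD_eq_getElem ms "" (by omega) (by omega),
          List.getD_eq_getElem ms "" hlt]
        congr 1
        omega)
      (fun j hj => by omega)
  · have hpre' : 5 * (-i) ≤ (ms.length : Int) := by
      rcases hpre with h | h | h
      · omega
      · have hx := hD2 h; omega
      · exact h
    have hi2 : i ≤ -2 := by omega
    rw [slice_eq_neg ms i hi2 hpre']
    exact countTired_eq_sum ms i p ((ms.length : Int) + i * 5).toNat
      (fun j hj hlt => by
        have hneg : i * 5 + (j : Int) < 0 := by omega
        have hneg' : ¬ (0 : Int) ≤ i * 5 + (j : Int) := by omega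
        have hlo : -(ms.length : Int) ≤ i * 5 + (j : Int) := by omega
        simp only [PySem.List.pyGetD, PySem.List.pyGet?, PySem.List.pyIdx?]
        rw [if_neg hneg', if_pos hlo, Option.bind_some,
          show ms.length - (-(i * 5 + (j : Int))).toNat = ((ms.length : Int) + i * 5).toNat + j
            by omega]
        rfl)
      (fun j hj => by omega)

theorem countTired_changed : Claim_changed_countTired := by
  unfold Claim_changed_countTired; decide

theorem countTired_tight : Claim_exact_countTired := by
  intro ms i p _ hpre hD
  rcases hD with hD | ⟨hp, hoff⟩
  · -- i = -1: B = 0 but A ≥ 5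
    subst hD
    have hB : countTired_alt ms (-1) p = 0 := by
      rw [alt_eq_sum, slice_neg_one]
      simp
    by_cases hp : p = "diamond"
    · subst hp
      rw [hB, countTired_diamond_neg ms (-1) (by norm_num)]
      norm_num
    · have hL : 5 ≤ ms.length := by
        rcases hpre with h | h | h
        · omega
        · exact absurd h hp
        · omega
      have hA : (5:Int) ≤ countTired ms (-1) p := by
        unfold countTired
        have := loop_ge ms (-1) p (PySem.List.pyRange 0 5 1) 0
          (by
            intro j hj
            rw [PySem.List.mem_pyRange_one] at hj
            rw [PySem.List.len_eq]
            omega)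
        simpa [PySem.List.length_pyRange_one] using this
      omega
  · -- diamond pick, window off the front: A = 5 but B = slice length < 5
    subst hp
    have hi : i < 0 := by omega
    rw [countTired_diamond_neg ms i hi]
    have hlen := slice_short ms i hoff
    have hB : countTired_alt ms i "diamond"
        = ((PySem.List.slice ms (some (i * 5)) (some (i * 5 + 5))).length : Int) := by
      rw [alt_eq_sum, sum_aCost, if_pos rfl]
    rw [hB]
    omega
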